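-- pv_equiv track=rewrite | github.com/sourrris/mlaude | src/mlaude/toolsets.py | resolve_toolset
-- ===== SOURCE A (Python) =====
-- from typing import Any
--
-- TOOLSETS: dict[str, dict[str, Any]] = {
--     # Base toolsets (groups of tools)
--     "file": {
--         "description": "File read/write/patch/search operations",
--         "tools": ["read_file", "write_file", "patch", "search_files"],
--     },
--     "terminal": {
--         "description": "Shell command execution",
--         "tools": ["terminal"],
--     },
--     "web": {
--         "description": "Web search and content extraction",
--         "tools": ["web_search", "web_extract"],
--     },
--     "browser": {
--         "description": "Browser automation (Playwright)",
--         "tools": ["browser_navigate", "browser_snapshot", "browser_click",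
--                   "browser_type", "browser_scroll"],
--     },
--     "delegation": {
--         "description": "Subagent task delegation",
--         "tools": ["delegate_task"],
--     },
--     "memory": {
--         "description": "Persistent cross-session memory",
--         "tools": ["memory", "session_search"],
--     },
--     "skills": {
--         "description": "Skill management",
--         "tools": ["skills_list", "skill_view", "skill_manage"],
--     },
--     "planning": {
--         "description": "Task planning and tracking",
--         "tools": ["todo"],
--     },
--
--     # Platform toolsets (composites — what each platform gets)
--     "mlaude-cli": {
--         "description": "CLI interactive mode",
--         "includes": ["file", "terminal", "web", "browser", "delegation",
--                      "memory", "skills", "planning"],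
--     },
--     "mlaude-telegram": {
--         "description": "Telegram messaging platform",
--         "includes": ["file", "terminal", "web", "browser", "memory"],
--     },
--     "mlaude-whatsapp": {
--         "description": "WhatsApp messaging platform",
--         "includes": ["file", "terminal", "web", "browser", "memory"],
--     },
--     "mlaude-email": {
--         "description": "Email messaging platform",
--         "includes": ["file", "terminal", "web", "memory"],
--     },
-- }
--
-- def resolve_toolset(name: str) -> list[str]:
--     """Resolve a toolset name to a flat list of tool names.
--
--     Handles nested ``includes`` references recursively.
--     """
--     seen: set[str] = set()
--
--     def _resolve(ts_name: str) -> list[str]: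
--         if ts_name in seen:
--             return []
--         seen.add(ts_name)
--
--         ts = TOOLSETS.get(ts_name)
--         if ts is None:
--             return []
--
--         result: list[str] = []
--
--         # Direct tools
--         for tool_name in ts.get("tools", []):
--             if tool_name not in result:
--                 result.append(tool_name)
--
--         # Included toolsets
--         for included in ts.get("includes", []):
--             for tool_name in _resolve(included):
--                 if tool_name not in result:
--                     result.append(tool_name)
--
--         return result
--
--     return _resolve(name)
-- ===== SOURCE B (Python) =====
-- from typing import Any
--
-- TOOLSETS: dict[str, dict[str, Any]] = {
--     "file": {"description": "File read/write/patch/search operations",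
--              "tools": ["read_file", "write_file", "patch", "search_files"]},
--     "terminal": {"description": "Shell command execution", "tools": ["terminal"]},
--     "web": {"description": "Web search and content extraction",
--             "tools": ["web_search", "web_extract"]},
--     "browser": {"description": "Browser automation (Playwright)",
--                 "tools": ["browser_navigate", "browser_snapshot", "browser_click",
--                           "browser_type", "browser_scroll"]},
--     "delegation": {"description": "Subagent task delegation", "tools": ["delegate_task"]},
--     "memory": {"description": "Persistent cross-session memory",
--                "tools": ["memory", "session_search"]},
--     "skills": {"description": "Skill management",
--                "tools": ["skills_list", "skill_view", "skill_manage"]},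
--     "planning": {"description": "Task planning and tracking", "tools": ["todo"]},
--     "mlaude-cli": {"description": "CLI interactive mode",
--                    "includes": ["file", "terminal", "web", "browser", "delegation",
--                                 "memory", "skills", "planning"]},
--     "mlaude-telegram": {"description": "Telegram messaging platform",
--                         "includes": ["file", "terminal", "web", "browser", "memory"]},
--     "mlaude-whatsapp": {"description": "WhatsApp messaging platform",
--                         "includes": ["file", "terminal", "web", "browser", "memory"]},
--     "mlaude-email": {"description": "Email messaging platform",
--                      "includes": ["file", "terminal", "web", "memory"]},
-- }
--
-- def resolve_toolset(name: str) -> list[str]: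
--     """Resolve a toolset name to a flat list of tool names (iterative DFS)."""
--     result: list[str] = []
--     emitted: set[str] = set()
--     seen: set[str] = set()
--     stack: list[str] = [name]
--     while stack:
--         ts_name = stack.pop()
--         if ts_name in seen:
--             continue
--         seen.add(ts_name)
--         ts = TOOLSETS.get(ts_name)
--         if ts is None:
--             continue
--         for tool in ts.get("tools", []):
--             if tool not in emitted:
--                 emitted.add(tool)
--                 result.append(tool)
--         stack.extend(reversed(ts.get("includes", [])))
--     return result
-- ===== Notes on version B (the rewrite author's own statement) =====
-- stated objective: alternative
-- what changed: Replaces the recursive nested _resolve helper (which builds per-call lists and merges them with quadratic 'not in result' scans) with a single iterative DFS loop over an explicit stack, pushing includes in reverse and deduplicating with one global emitted set.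
import Mathlib
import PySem

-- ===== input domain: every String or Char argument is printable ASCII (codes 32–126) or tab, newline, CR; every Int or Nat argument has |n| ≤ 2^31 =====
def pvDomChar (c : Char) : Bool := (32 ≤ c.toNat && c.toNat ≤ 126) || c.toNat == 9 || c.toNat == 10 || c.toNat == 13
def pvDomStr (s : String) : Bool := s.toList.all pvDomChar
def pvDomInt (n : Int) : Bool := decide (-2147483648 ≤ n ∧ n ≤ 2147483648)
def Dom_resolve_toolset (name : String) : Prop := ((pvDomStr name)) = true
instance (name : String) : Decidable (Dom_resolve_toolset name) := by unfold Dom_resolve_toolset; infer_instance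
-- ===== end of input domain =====

-- B replaces A's recursive helper by an iterative DFS with an explicit stack and a
-- global emitted-set, removing both recursion and the quadratic `tool not in result`
-- membership scans (objective: alternative decomposition).

-- ===== PORT A =====
-- The module-level TOOLSETS dict: only the "tools"/"includes" entries influence the
-- result ("description" is never read), so each value is modelled by those two lists,
-- with ts.get("tools", []) / ts.get("includes", []) becoming the field reads.
structure Toolset where
  tools : List String
  includes : List String
deriving DecidableEq, Repr

def TOOLSETS : PySem.Dict String Toolset :=
  PySem.Dict.mk
  [ ("file", ⟨["read_file", "write_file", "patch", "search_files"], []⟩),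
    ("terminal", ⟨["terminal"], []⟩),
    ("web", ⟨["web_search", "web_extract"], []⟩),
    ("browser", ⟨["browser_navigate", "browser_snapshot", "browser_click",
                  "browser_type", "browser_scroll"], []⟩),
    ("delegation", ⟨["delegate_task"], []⟩),
    ("memory", ⟨["memory", "session_search"], []⟩),
    ("skills", ⟨["skills_list", "skill_view", "skill_manage"], []⟩),
    ("planning", ⟨["todo"], []⟩),
    ("mlaude-cli", ⟨[], ["file", "terminal", "web", "browser", "delegation",
                         "memory", "skills", "planning"]⟩),
    ("mlaude-telegram", ⟨[], ["file", "terminal", "web", "browser", "memory"]⟩),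
    ("mlaude-whatsapp", ⟨[], ["file", "terminal", "web", "browser", "memory"]⟩),
    ("mlaude-email", ⟨[], ["file", "terminal", "web", "memory"]⟩) ]

-- A's nested `_resolve`, with the shared mutable `seen` threaded through as state.
-- Fuel bounds the recursion depth: every call that recurses has first added a NEW
-- key of TOOLSETS to `seen`, so depth never exceeds 12 keys + 1; fuel 13 is exact.
def aResolve : Nat → PySem.Set String → String → List String × PySem.Set String
  | 0, seen, _ => ([], seen)
  | fuel + 1, seen, ts_name =>
    if PySem.Set.contains seen ts_name then ([], seen)
    else
      let seen := PySem.Set.add seen ts_name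
      match PySem.Dict.get? TOOLSETS ts_name with
      | none => ([], seen)
      | some ts =>
        let result := ts.tools.foldl
          (fun r tool_name => if r.contains tool_name then r else r ++ [tool_name]) []
        ts.includes.foldl
          (fun (p : List String × PySem.Set String) included =>
            let (sub, seen') := aResolve fuel p.2 included
            (sub.foldl
              (fun r tool_name => if r.contains tool_name then r else r ++ [tool_name])
              p.1, seen'))
          (result, seen)

def resolve_toolset (name : String) : List String :=
  (aResolve 13 PySem.Set.empty name).1

-- ===== PORT B =====
-- Source B's while loop; the stack's TOP is the list HEAD here, so Python's
-- `stack.extend(reversed(includes))` becomes prepending `includes` in order.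
-- Fuel bounds the iteration count: at most 1 + total includes pushed (each unseen
-- key pushes its includes once: ≤ 12·8) plus one pop per pushed name; 200 is ample.
def bLoop : Nat → List String → PySem.Set String → PySem.Set String → List String →
    List String
  | 0, result, _, _, _ => result
  | _ + 1, result, _, _, [] => result
  | fuel + 1, result, emitted, seen, ts_name :: rest =>
    if PySem.Set.contains seen ts_name then bLoop fuel result emitted seen rest
    else
      let seen := PySem.Set.add seen ts_name
      match PySem.Dict.get? TOOLSETS ts_name with
      | none => bLoop fuel result emitted seen rest
      | some ts =>
        let (result, emitted) := ts.tools.foldl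
          (fun (p : List String × PySem.Set String) tool =>
            if PySem.Set.contains p.2 tool then p
            else (p.1 ++ [tool], PySem.Set.add p.2 tool))
          (result, emitted)
        bLoop fuel result emitted seen (ts.includes ++ rest)

def resolve_toolset_alt (name : String) : List String :=
  bLoop 200 [] PySem.Set.empty PySem.Set.empty [name]

-- ===== PRECONDITION & SPEC =====
def Spec_resolve_toolset (name : String) (out : List String) : Prop := out = resolve_toolset_alt name
instance (name : String) (out : List String) : Decidable (Spec_resolve_toolset name out) := by unfold Spec_resolve_toolset; infer_instance

-- ===== CLAIM (what is proved, stated in full; the proofs are below) =====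
def Claim_equal_resolve_toolset : Prop := ∀ (name : String), Dom_resolve_toolset name → Spec_resolve_toolset name (resolve_toolset name)

-- ===== LEMMAS AND PROOFS =====

-- A name that is a key of TOOLSETS is one of the 12 literal keys.
lemma key_cases (name : String) (ts : Toolset) (h : PySem.Dict.get? TOOLSETS name = some ts) :
    name = "file" ∨ name = "terminal" ∨ name = "web" ∨ name = "browser" ∨
    name = "delegation" ∨ name = "memory" ∨ name = "skills" ∨ name = "planning" ∨
    name = "mlaude-cli" ∨ name = "mlaude-telegram" ∨ name = "mlaude-whatsapp" ∨
    name = "mlaude-email" := by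
  unfold PySem.Dict.get? at h
  cases hf : List.find? (fun p => p.1 == name) TOOLSETS.items with
  | none => rw [hf] at h; simp at h
  | some p =>
    have hm := List.mem_of_find?_eq_some hf
    have hb := List.find?_some hf
    simp only [TOOLSETS, List.mem_cons, List.not_mem_nil, or_false] at hm
    rcases hm with hm|hm|hm|hm|hm|hm|hm|hm|hm|hm|hm|hm <;> subst hm <;>
      simp only [beq_iff_eq] at hb <;> simp [hb.symm]

-- On a non-key name both programs return [].
lemma not_key_nil (name : String) (h : PySem.Dict.get? TOOLSETS name = none) :
    resolve_toolset name = [] ∧ resolve_toolset_alt name = [] := by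
  constructor
  · simp [resolve_toolset, aResolve, h, PySem.Set.contains, PySem.Set.empty]
  · simp [resolve_toolset_alt, bLoop, h, PySem.Set.contains, PySem.Set.empty]

-- ===== VERDICT (by name: the statement is the Claim_ definition above) =====
theorem resolve_toolset_spec : Claim_equal_resolve_toolset := by
  intro name _
  unfold Spec_resolve_toolset
  cases hk : PySem.Dict.get? TOOLSETS name with
  | none =>
    obtain ⟨ha, hb⟩ := not_key_nil name hk
    rw [ha, hb]
  | some ts =>
    rcases key_cases name ts hk with h|h|h|h|h|h|h|h|h|h|h|h <;> subst h <;> decide
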